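-- pv_equiv track=rewrite | github.com/cxjcjj/fackbank | factbankTrain/train.py | judge_value
-- ===== SOURCE A (Python) =====
-- def judge_value(result, cues):
--     res = []
--     if result == 'Uu' or result == 'CT+':
--         for cue in cues:
--             res.append(0)
--     elif result == 'CT-':
--         for cue in cues:
--             if cue == '3':
--                 res.append(1)
--             else:
--                 res.append(0)
--     elif result == 'PR+':
--         for cue in cues:
--             if cue == '2':
--                 res.append(1)
--             else:
--                 res.append(0)
--     elif result == 'PS+':
--         for cue in cues:
--             if cue == '1':
--                 res.append(1)
--             else:
--                 res.append(0)
--     elif result == 'PR-':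
--         for cue in cues:
--             if cue == '2' or cue == '3' or cue == '5':
--                 res.append(1)
--             else:
--                 res.append(0)
--     elif result == 'PS-':
--         for cue in cues:
--             if cue == '1' or cue == '3' or cue == '4':
--                 res.append(1)
--             else:
--                 res.append(0)
--     else:
--         for cue in cues:
--             res.append(0)
--     return res
-- ===== SOURCE B (Python) =====
-- # B: instead of dispatching on `result` and running one branch-specific pass over
-- # `cues`, iterate over a flat table of the positive (result, cue) pairs, merging a
-- # 1-mask into a zero vector for each pair whose result matches.
-- _PAIRS = [('CT-', '3'), ('PR+', '2'), ('PS+', '1'),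
--           ('PR-', '2'), ('PR-', '3'), ('PR-', '5'),
--           ('PS-', '1'), ('PS-', '3'), ('PS-', '4')]
--
-- def judge_value(result, cues):
--     res = [0] * len(cues)
--     for r, c in _PAIRS:
--         if r == result:
--             res = [1 if cue == c else v for cue, v in zip(cues, res)]
--     return res
-- ===== Notes on version B (the rewrite author's own statement) =====
-- stated objective: alternative
-- what changed: Instead of a seven-branch dispatch on result each running its own pass over cues, B starts from a zero vector and folds over a flat table of the positive (result, cue) pairs, merging a 1-mask layer into the vector for every pair whose result matches.
import Mathlib
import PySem

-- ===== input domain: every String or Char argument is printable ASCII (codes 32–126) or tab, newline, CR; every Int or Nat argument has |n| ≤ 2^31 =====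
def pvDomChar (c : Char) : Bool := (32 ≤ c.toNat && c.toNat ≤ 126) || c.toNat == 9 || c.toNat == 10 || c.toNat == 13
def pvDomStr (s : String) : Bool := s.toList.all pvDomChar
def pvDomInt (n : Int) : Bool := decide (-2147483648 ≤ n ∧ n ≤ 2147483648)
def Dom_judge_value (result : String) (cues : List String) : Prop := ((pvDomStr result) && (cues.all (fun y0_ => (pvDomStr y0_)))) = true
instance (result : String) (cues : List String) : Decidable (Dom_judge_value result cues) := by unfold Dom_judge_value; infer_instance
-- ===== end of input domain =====

-- B replaces A's seven-branch dispatch (each with its own loop) by a fold over a flat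
-- table of positive (result, cue) pairs merging 1-masks into a zero vector; objective: alternative.

-- ===== PORT A =====
def judge_value (result : String) (cues : List String) : List Int :=
  let res : List Int := []
  if result == "Uu" || result == "CT+" then
    cues.foldl (fun res _cue => res ++ [0]) res
  else if result == "CT-" then
    cues.foldl (fun res cue => if cue == "3" then res ++ [1] else res ++ [0]) res
  else if result == "PR+" then
    cues.foldl (fun res cue => if cue == "2" then res ++ [1] else res ++ [0]) res
  else if result == "PS+" then
    cues.foldl (fun res cue => if cue == "1" then res ++ [1] else res ++ [0]) res
  else if result == "PR-" then
    cues.foldl (fun res cue => if cue == "2" || cue == "3" || cue == "5" then res ++ [1] else res ++ [0]) res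
  else if result == "PS-" then
    cues.foldl (fun res cue => if cue == "1" || cue == "3" || cue == "4" then res ++ [1] else res ++ [0]) res
  else
    cues.foldl (fun res _cue => res ++ [0]) res

-- ===== PORT B =====
-- the module-level table _PAIRS of Source B
def pvPairs : List (String × String) :=
  [("CT-", "3"), ("PR+", "2"), ("PS+", "1"),
   ("PR-", "2"), ("PR-", "3"), ("PR-", "5"),
   ("PS-", "1"), ("PS-", "3"), ("PS-", "4")]

def judge_value_alt (result : String) (cues : List String) : List Int :=
  let res : List Int := cues.map (fun _ => 0)   -- [0] * len(cues)
  pvPairs.foldl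
    (fun res p =>
      if p.1 == result then
        List.zipWith (fun cue v => if cue == p.2 then (1 : Int) else v) cues res
      else res)
    res

-- ===== PRECONDITION & SPEC =====
def Spec_judge_value (result : String) (cues : List String) (out : List Int) : Prop := out = judge_value_alt result cues
instance (result : String) (cues : List String) (out : List Int) : Decidable (Spec_judge_value result cues out) := by unfold Spec_judge_value; infer_instance

-- ===== CLAIM (what is proved, stated in full; the proofs are below) =====
def Claim_equal_judge_value : Prop := ∀ (result : String) (cues : List String), Dom_judge_value result cues → Spec_judge_value result cues (judge_value result cues)

-- ===== LEMMAS AND PROOFS =====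

-- A's per-branch loop appends exactly one element per cue, so it builds acc ++ map.
theorem foldl_append_fn (g : List Int → String → List Int) (h : String → Int)
    (hg : ∀ res cue, g res cue = res ++ [h cue]) :
    ∀ (cues : List String) (acc : List Int), cues.foldl g acc = acc ++ cues.map h := by
  intro cues
  induction cues with
  | nil => simp
  | cons c t ih => intro acc; rw [List.foldl_cons, hg, ih, List.map_cons]; simp

-- merging a mask layer into a vector that is already a pointwise image of cues
theorem zipWith_map_self {α β γ : Type} (f : α → β → γ) (g : α → β) :
    ∀ (l : List α), List.zipWith f l (l.map g) = l.map (fun a => f a (g a)) := by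
  intro l; induction l with
  | nil => rfl
  | cons a t ih => simp [ih]

-- ===== VERDICT (by name: the statement is the Claim_ definition above) =====
theorem judge_value_spec : Claim_equal_judge_value := by
  intro result cues _
  unfold Spec_judge_value judge_value judge_value_alt pvPairs
  by_cases h1 : result = "Uu"
  · subst h1
    simp only [List.foldl_cons, List.foldl_nil, show (("CT-" : String) == "Uu") = false from rfl,
      show (("PR+" : String) == "Uu") = false from rfl, show (("PS+" : String) == "Uu") = false from rfl,
      show (("PR-" : String) == "Uu") = false from rfl, show (("PS-" : String) == "Uu") = false from rfl,
      Bool.false_eq_true, if_false]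
    simp only [show (("Uu" : String) == "Uu" || "Uu" == "CT+") = true from rfl, if_true]
    rw [foldl_append_fn _ (fun _ => (0 : Int)) (fun _ _ => rfl) cues []]
    simp
  by_cases h2 : result = "CT+"
  · subst h2
    simp only [List.foldl_cons, List.foldl_nil, show (("CT-" : String) == "CT+") = false from rfl,
      show (("PR+" : String) == "CT+") = false from rfl, show (("PS+" : String) == "CT+") = false from rfl,
      show (("PR-" : String) == "CT+") = false from rfl, show (("PS-" : String) == "CT+") = false from rfl,
      Bool.false_eq_true, if_false]
    simp only [show (("CT+" : String) == "Uu" || "CT+" == "CT+") = true from rfl, if_true]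
    rw [foldl_append_fn _ (fun _ => (0 : Int)) (fun _ _ => rfl) cues []]
    simp
  by_cases h3 : result = "CT-"
  · subst h3
    simp only [List.foldl_cons, List.foldl_nil, show (("CT-" : String) == "CT-") = true from rfl,
      show (("PR+" : String) == "CT-") = false from rfl, show (("PS+" : String) == "CT-") = false from rfl,
      show (("PR-" : String) == "CT-") = false from rfl, show (("PS-" : String) == "CT-") = false from rfl,
      Bool.false_eq_true, if_false, if_true]
    simp only [show (("CT-" : String) == "Uu" || "CT-" == "CT+") = false from rfl,
      Bool.false_eq_true, if_false]
    rw [foldl_append_fn _ (fun cue => if cue == "3" then (1 : Int) else 0)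
      (fun res cue => by by_cases hc : cue == "3" <;> simp [hc]) cues [],
      zipWith_map_self]
    simp
  by_cases h4 : result = "PR+"
  · subst h4
    simp only [List.foldl_cons, List.foldl_nil, show (("CT-" : String) == "PR+") = false from rfl,
      show (("PR+" : String) == "PR+") = true from rfl, show (("PS+" : String) == "PR+") = false from rfl,
      show (("PR-" : String) == "PR+") = false from rfl, show (("PS-" : String) == "PR+") = false from rfl,
      Bool.false_eq_true, if_false, if_true]
    simp only [show (("PR+" : String) == "Uu" || "PR+" == "CT+") = false from rfl,
      show (("PR+" : String) == "CT-") = false from rfl,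
      Bool.false_eq_true, if_false]
    rw [foldl_append_fn _ (fun cue => if cue == "2" then (1 : Int) else 0)
      (fun res cue => by by_cases hc : cue == "2" <;> simp [hc]) cues [],
      zipWith_map_self]
    simp
  by_cases h5 : result = "PS+"
  · subst h5
    simp only [List.foldl_cons, List.foldl_nil, show (("CT-" : String) == "PS+") = false from rfl,
      show (("PR+" : String) == "PS+") = false from rfl, show (("PS+" : String) == "PS+") = true from rfl,
      show (("PR-" : String) == "PS+") = false from rfl, show (("PS-" : String) == "PS+") = false from rfl,
      Bool.false_eq_true, if_false, if_true]
    simp only [show (("PS+" : String) == "Uu" || "PS+" == "CT+") = false from rfl,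
      show (("PS+" : String) == "CT-") = false from rfl,
      show (("PS+" : String) == "PR+") = false from rfl,
      Bool.false_eq_true, if_false]
    rw [foldl_append_fn _ (fun cue => if cue == "1" then (1 : Int) else 0)
      (fun res cue => by by_cases hc : cue == "1" <;> simp [hc]) cues [],
      zipWith_map_self]
    simp
  by_cases h6 : result = "PR-"
  · subst h6
    simp only [List.foldl_cons, List.foldl_nil, show (("CT-" : String) == "PR-") = false from rfl,
      show (("PR+" : String) == "PR-") = false from rfl, show (("PS+" : String) == "PR-") = false from rfl,
      show (("PR-" : String) == "PR-") = true from rfl, show (("PS-" : String) == "PR-") = false from rfl,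
      Bool.false_eq_true, if_false, if_true]
    simp only [show (("PR-" : String) == "Uu" || "PR-" == "CT+") = false from rfl,
      show (("PR-" : String) == "CT-") = false from rfl,
      show (("PR-" : String) == "PR+") = false from rfl,
      show (("PR-" : String) == "PS+") = false from rfl,
      Bool.false_eq_true, if_false]
    rw [foldl_append_fn _ (fun cue => if cue == "2" || cue == "3" || cue == "5" then (1 : Int) else 0)
      (fun res cue => by by_cases hc : cue == "2" || cue == "3" || cue == "5" <;> simp [hc]) cues [],
      zipWith_map_self, zipWith_map_self, zipWith_map_self]
    simp only [List.nil_append]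
    congr 1; funext cue
    by_cases ha : cue = "2" <;> by_cases hb : cue = "3" <;> by_cases hc : cue = "5" <;>
      simp [ha, hb, hc]
  by_cases h7 : result = "PS-"
  · subst h7
    simp only [List.foldl_cons, List.foldl_nil, show (("CT-" : String) == "PS-") = false from rfl,
      show (("PR+" : String) == "PS-") = false from rfl, show (("PS+" : String) == "PS-") = false from rfl,
      show (("PR-" : String) == "PS-") = false from rfl, show (("PS-" : String) == "PS-") = true from rfl,
      Bool.false_eq_true, if_false, if_true]
    simp only [show (("PS-" : String) == "Uu" || "PS-" == "CT+") = false from rfl,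
      show (("PS-" : String) == "CT-") = false from rfl,
      show (("PS-" : String) == "PR+") = false from rfl,
      show (("PS-" : String) == "PS+") = false from rfl,
      show (("PS-" : String) == "PR-") = false from rfl,
      Bool.false_eq_true, if_false]
    rw [foldl_append_fn _ (fun cue => if cue == "1" || cue == "3" || cue == "4" then (1 : Int) else 0)
      (fun res cue => by by_cases hc : cue == "1" || cue == "3" || cue == "4" <;> simp [hc]) cues [],
      zipWith_map_self, zipWith_map_self, zipWith_map_self]
    simp only [List.nil_append]
    congr 1; funext cue
    by_cases ha : cue = "1" <;> by_cases hb : cue = "3" <;> by_cases hc : cue = "4" <;>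
      simp [ha, hb, hc]
  · simp only [List.foldl_cons, List.foldl_nil,
      beq_eq_false_iff_ne.mpr (Ne.symm h3), beq_eq_false_iff_ne.mpr (Ne.symm h4),
      beq_eq_false_iff_ne.mpr (Ne.symm h5), beq_eq_false_iff_ne.mpr (Ne.symm h6),
      beq_eq_false_iff_ne.mpr (Ne.symm h7), Bool.false_eq_true, if_false]
    simp only [beq_iff_eq, h1, h2, h3, h4, h5, h6, h7, Bool.or_eq_true, or_self, if_false]
    rw [foldl_append_fn _ (fun _ => (0 : Int)) (fun _ _ => rfl) cues []]
    simp
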